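-- pv_equiv track=rewrite | github.com/KubMis/Inteligencja_Obliczeniowa | lab1/zad1.py | calculate_month_days
-- ===== SOURCE A (Python) =====
-- def calculate_month_days(month):
--     month_days=0
--     for i in range (month):
--         if month in [1, 3, 5, 7, 8, 10, 12]:
--             month_days += 31
--         elif month in [4, 6, 9, 11]:
--             month_days += 30
--         else:
--             month_days += 28
--
--     return month_days
-- ===== SOURCE B (Python) =====
-- _DAYS = {1: 31, 2: 28, 3: 31, 4: 30, 5: 31, 6: 30,
--          7: 31, 8: 31, 9: 30, 10: 31, 11: 30, 12: 31}
--
-- def calculate_month_days(month):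
--     return max(month, 0) * _DAYS.get(month, 28)
-- ===== Notes on version B (the rewrite author's own statement) =====
-- stated objective: faster
-- what changed: Replaced the loop (which adds a per-month constant month times, chosen by list-membership tests) with a single multiplication max(month,0) * days, where days comes from one dict lookup in a precomputed month->days table (default 28).
import Mathlib
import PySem

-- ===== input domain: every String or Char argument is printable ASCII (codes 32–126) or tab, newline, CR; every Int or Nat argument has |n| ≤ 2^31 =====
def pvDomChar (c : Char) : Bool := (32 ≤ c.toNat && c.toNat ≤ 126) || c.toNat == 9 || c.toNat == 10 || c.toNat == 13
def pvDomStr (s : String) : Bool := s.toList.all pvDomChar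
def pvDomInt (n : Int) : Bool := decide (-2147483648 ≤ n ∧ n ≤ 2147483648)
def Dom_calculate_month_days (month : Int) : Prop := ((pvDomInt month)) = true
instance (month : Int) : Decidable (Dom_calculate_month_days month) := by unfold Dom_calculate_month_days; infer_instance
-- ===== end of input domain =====

-- B replaces A's loop of membership-test additions by max(month,0) * (one dict lookup in a month->days table): asymptotically faster, same value.
-- ===== PORT A =====
def calculate_month_days (month : Int) : Int :=
  (PySem.List.pyRange 0 month 1).foldl
    (fun month_days _ =>
      if month ∈ ([1, 3, 5, 7, 8, 10, 12] : List Int) then month_days + 31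
      else if month ∈ ([4, 6, 9, 11] : List Int) then month_days + 30
      else month_days + 28)
    0

-- ===== PORT B =====
def pvDaysTable : PySem.Dict Int Int :=
  PySem.Dict.ofList [(1, 31), (2, 28), (3, 31), (4, 30), (5, 31), (6, 30),
                     (7, 31), (8, 31), (9, 30), (10, 31), (11, 30), (12, 31)]

def calculate_month_days_alt (month : Int) : Int :=
  max month 0 * PySem.Dict.getD pvDaysTable month 28

-- ===== PRECONDITION & SPEC =====
def Spec_calculate_month_days (month : Int) (out : Int) : Prop := out = calculate_month_days_alt month
instance (month : Int) (out : Int) : Decidable (Spec_calculate_month_days month out) := by unfold Spec_calculate_month_days; infer_instance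

-- ===== CLAIM (what is proved, stated in full; the proofs are below) =====
def Claim_equal_calculate_month_days : Prop := ∀ (month : Int), Dom_calculate_month_days month → Spec_calculate_month_days month (calculate_month_days month)

-- ===== LEMMAS AND PROOFS =====
-- foldl that adds a constant c at each step yields acc + c * length
theorem pv_foldl_const_add (l : List Int) (c acc : Int) :
    l.foldl (fun a _ => a + c) acc = acc + c * l.length := by
  induction l generalizing acc with
  | nil => simp
  | cons x xs ih => simp [List.foldl, ih]; ring

-- A's loop in closed form: its per-iteration constant times max(month,0)
theorem pv_A_closed (month c : Int) :
    (PySem.List.pyRange 0 month 1).foldl (fun a _ => a + c) 0 = max month 0 * c := by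
  rw [pv_foldl_const_add]
  simp [PySem.List.length_pyRange_one]
  ring

-- B's table lookup agrees with A's branch constant for every month
theorem pv_table_eq (month : Int) :
    PySem.Dict.getD pvDaysTable month 28 =
      if month ∈ ([1, 3, 5, 7, 8, 10, 12] : List Int) then 31
      else if month ∈ ([4, 6, 9, 11] : List Int) then 30
      else 28 := by
  by_cases h : 1 ≤ month ∧ month ≤ 12
  · obtain ⟨hlo, hhi⟩ := h
    interval_cases month <;> decide
  · have hm1 : month ∉ ([1, 3, 5, 7, 8, 10, 12] : List Int) := by simp; omega
    have hm2 : month ∉ ([4, 6, 9, 11] : List Int) := by simp; omega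
    rw [if_neg hm1, if_neg hm2, PySem.Dict.getD_eq_get?_getD]
    have hnone : PySem.Dict.get? pvDaysTable month = none := by
      rw [PySem.Dict.get?_eq_none_iff_not_mem_keys]
      have e : pvDaysTable.keys = [1, 2, 3, 4, 5, 6, 7, 8, 9, 10, 11, 12] := by decide
      rw [e]; simp; omega
    rw [hnone]; rfl

-- ===== VERDICT (by name: the statement is the Claim_ definition above) =====
theorem calculate_month_days_spec : Claim_equal_calculate_month_days := by
  intro month _
  unfold Spec_calculate_month_days calculate_month_days calculate_month_days_alt
  rw [pv_table_eq]
  by_cases h31 : month ∈ ([1, 3, 5, 7, 8, 10, 12] : List Int)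
  · simp only [if_pos h31]; exact pv_A_closed month 31
  · by_cases h30 : month ∈ ([4, 6, 9, 11] : List Int)
    · simp only [if_neg h31, if_pos h30]; exact pv_A_closed month 30
    · simp only [if_neg h31, if_neg h30]; exact pv_A_closed month 28
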